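-- pv_equiv track=rewrite | github.com/siljec/project-idi-rnnchatbot | Models/helpers.py | get_sliced_output
-- ===== SOURCE A (Python) =====
-- def get_sliced_output(text, num_sentences):
--     text.replace("_EMJ", ":)")
--
--     # Find indices where the text should split
--     indices = [pos+len(char) for pos, char in enumerate(text) if char in [".", "?", "!", ":)"]]
--     lines = []
--
--     if indices != []:
--         prev = 0
--
--         # Split on all indices
--         for index in indices:
--             lines.append(text[prev:index].strip())
--             prev = index
--
--         # Put upper case on all sentence starts
--         lines = [line.capitalize() for line in lines]
--
--
--         prev_sentence = ""
--         text = ""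
--         for sentence in range(num_sentences):
--             if prev_sentence != lines[sentence]:
--                 text += lines[sentence] + " "
--     else:
--         text = text.capitalize()
--     # Upper case I
--     text = text.replace(" i ", " I ")
--     return text
-- ===== SOURCE B (Python) =====
-- def _next_mark(text, start):
--     # First sentence terminator at or after position start, -1 if none.
--     for i in range(start, len(text)):
--         if text[i] in ".?!":
--             return i
--     return -1
--
--
-- def get_sliced_output(text, num_sentences):
--     # Cursor-driven on-demand scan: find each next terminator from the cursor,
--     # emit that sentence, count num_sentences down; no index list, no lines list.
--     if any(c in text for c in ".?!"):
--         parts = []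
--         start = 0
--         n = num_sentences
--         while n > 0:
--             cut = _next_mark(text, start)
--             if cut == -1:
--                 break
--             line = text[start:cut + 1].strip().capitalize()
--             if line:
--                 parts.append(line + " ")
--             start = cut + 1
--             n -= 1
--         out = "".join(parts)
--     else:
--         out = text.capitalize()
--     return out.replace(" i ", " I ")
-- ===== Notes on version B (the rewrite author's own statement) =====
-- stated objective: alternative
-- what changed: B replaces A's staged pipeline (build the full list of split indices by enumerating the text, a second loop slicing between consecutive indices, a separate capitalize pass over all lines, then an index-based range loop reading lines[sentence]) by a cursor-driven while-loop that finds the next terminator on demand (_next_mark from the cursor), emits that one sentence stripped+capitalized immediately, and counts num_sentences down, so it never materialises the index list or the full lines list and stops after num_sentences sentences.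
-- outside the precondition, e.g. on get_sliced_output('a.', 2): A raises IndexError, B returns 'A. '
-- crash fix: When the text contains at least one of '.', '?', '!' but fewer such marks than num_sentences, A raises IndexError (lines[sentence] out of range); B returns the joined sentences since its while-loop stops at the last mark. — e.g. on get_sliced_output("a.", 2): A raises IndexError, B returns "A. "
import Mathlib
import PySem

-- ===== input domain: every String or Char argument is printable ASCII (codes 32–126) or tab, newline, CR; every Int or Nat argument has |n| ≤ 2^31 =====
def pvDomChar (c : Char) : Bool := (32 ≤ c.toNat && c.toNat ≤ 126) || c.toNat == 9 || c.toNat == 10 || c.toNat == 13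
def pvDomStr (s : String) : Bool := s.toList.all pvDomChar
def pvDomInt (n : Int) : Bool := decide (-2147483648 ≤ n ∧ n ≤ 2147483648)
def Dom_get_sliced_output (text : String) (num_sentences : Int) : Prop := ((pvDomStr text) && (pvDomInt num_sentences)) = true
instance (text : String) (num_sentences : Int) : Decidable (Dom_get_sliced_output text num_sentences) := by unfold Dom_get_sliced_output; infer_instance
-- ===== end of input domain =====

-- B replaces A's staged passes (index list, slicing loop, capitalize pass, range loop) by a
-- cursor-driven scan that finds each next terminator on demand and counts num_sentences down;
-- equal wherever A returns (Pre_ excludes A's IndexError).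

-- str.capitalize(): first char uppercased, rest lowercased (exact on the printable-ASCII domain;
-- shared primitive port, PySem has no capitalize)
def pyCapitalize (s : List Char) : List Char :=
  match s with
  | [] => []
  | c :: rest => PySem.Chars.upperChar c :: rest.map PySem.Chars.lowerChar

-- ===== PORT A =====
def get_sliced_output (text : String) (num_sentences : Int) : String :=
  let cs := text.toList
  -- text.replace("_EMJ", ":)") : the Python discards the result, no effect
  let indices : List Int := (PySem.List.enumerate cs).filterMap
    (fun pc => if [".", "?", "!", ":)"].contains (String.singleton pc.2)
               then some (pc.1 + 1) else none)   -- pos + len(char); len(char) = 1 for a single char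
  let t : List Char :=
    if indices ≠ [] then
      let st := indices.foldl
        (fun (st : Int × List (List Char)) index =>
          (index, st.2 ++ [PySem.Chars.strip (PySem.Chars.slice cs (some st.1) (some index))]))
        (0, [])
      let lines := st.2.map pyCapitalize
      let st2 := (PySem.List.pyRange 0 num_sentences 1).foldl
        (fun (st : List Char × List Char) sentence =>
          let line := (PySem.List.pyGet? lines sentence).getD []   -- none = IndexError, excluded by Pre_
          if st.1 ≠ line then (st.1, st.2 ++ (line ++ [' '])) else st)
        ([], [])
      st2.2
    else pyCapitalize cs
  String.ofList (PySem.Chars.replace t [' ', 'i', ' '] [' ', 'I', ' '])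

-- ===== PORT B =====
-- _next_mark(text, start): scan from start, return the first index of '.', '?', '!' or -1
-- (recursion over range(start, len(text)) transliterates the for-with-return)
def nextMarkGo (cs : List Char) : List Int → Int
  | [] => -1
  | i :: is =>
    if (PySem.List.pyGet? cs i).getD ' ' ∈ (['.', '?', '!'] : List Char) then i
    else nextMarkGo cs is

def nextMark (cs : List Char) (start : Int) : Int :=
  nextMarkGo cs (PySem.List.pyRange start (cs.length : Int) 1)

-- the while loop 'while n > 0: cut = _next_mark(...); …; start = cut+1; n -= 1'
-- (counts down: n.toNat iterations at most, stops early at cut == -1)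
def goB (cs : List Char) : Nat → Int → List (List Char) → List (List Char)
  | 0, _, parts => parts
  | k + 1, start, parts =>
    let cut := nextMark cs start
    if cut = -1 then parts
    else
      let line := pyCapitalize (PySem.Chars.strip (PySem.Chars.slice cs (some start) (some (cut + 1))))
      goB cs k (cut + 1) (if line ≠ [] then parts ++ [line ++ [' ']] else parts)

def get_sliced_output_alt (text : String) (num_sentences : Int) : String :=
  let cs := text.toList
  let t : List Char :=
    if (['.', '?', '!'] : List Char).any (fun c => cs.contains c) then
      (goB cs num_sentences.toNat 0 []).flatten          -- "".join(parts)
    else pyCapitalize cs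
  String.ofList (PySem.Chars.replace t [' ', 'i', ' '] [' ', 'I', ' '])

-- ===== PRECONDITION & SPEC =====
-- Pre_ excludes exactly the inputs where A raises IndexError: at least one of '.', '?', '!'
-- occurs but num_sentences exceeds the number of such marks.
def Pre_get_sliced_output (text : String) (num_sentences : Int) : Prop :=
  text.toList.countP (fun c => c ∈ ['.', '?', '!']) = 0 ∨
  num_sentences ≤ (text.toList.countP (fun c => c ∈ ['.', '?', '!']) : Int)
instance (text : String) (num_sentences : Int) : Decidable (Pre_get_sliced_output text num_sentences) := by
  unfold Pre_get_sliced_output; infer_instance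

def pvWitness_get_sliced_output : String × Int := ("hello. world? i am here! tail", 3)

-- On inputs with at least one of '.', '?', '!' but fewer marks than num_sentences, A raises
-- IndexError while B returns the joined sentences (its while-loop stops at the last mark).
def Raises_get_sliced_output (text : String) (num_sentences : Int) : Prop :=
  0 < text.toList.countP (fun c => c ∈ ['.', '?', '!']) ∧
  (text.toList.countP (fun c => c ∈ ['.', '?', '!']) : Int) < num_sentences
instance (text : String) (num_sentences : Int) : Decidable (Raises_get_sliced_output text num_sentences) := by
  unfold Raises_get_sliced_output; infer_instance
def pvRaiseWitness_get_sliced_output : String × Int := ("a.", 2)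
def pvRaiseWitnessOut_get_sliced_output : String := "A. "

def Spec_get_sliced_output (text : String) (num_sentences : Int) (out : String) : Prop :=
  out = get_sliced_output_alt text num_sentences
instance (text : String) (num_sentences : Int) (out : String) : Decidable (Spec_get_sliced_output text num_sentences out) := by
  unfold Spec_get_sliced_output; infer_instance

-- ===== CLAIM (what is proved, stated in full; the proofs are below) =====
def Claim_equal_get_sliced_output : Prop := ∀ (text : String) (num_sentences : Int), Dom_get_sliced_output text num_sentences → Pre_get_sliced_output text num_sentences → Spec_get_sliced_output text num_sentences (get_sliced_output text num_sentences)

def Claim_raises_get_sliced_output : Prop := (∀ (text : String) (num_sentences : Int), Dom_get_sliced_output text num_sentences → Raises_get_sliced_output text num_sentences → ¬ Pre_get_sliced_output text num_sentences) ∧ (Dom_get_sliced_output (pvRaiseWitness_get_sliced_output.1) (pvRaiseWitness_get_sliced_output.2) ∧ Raises_get_sliced_output (pvRaiseWitness_get_sliced_output.1) (pvRaiseWitness_get_sliced_output.2) ∧ get_sliced_output_alt (pvRaiseWitness_get_sliced_output.1) (pvRaiseWitness_get_sliced_output.2) = pvRaiseWitnessOut_get_sliced_output)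

-- ===== LEMMAS AND PROOFS =====

-- A's membership test [".","?","!",":)"].contains on a one-character string is the character
-- test c ∈ ['.','?','!'] (a single char never equals ":)").
theorem charTest_bridge (c : Char) :
    ([".", "?", "!", ":)"].contains (String.singleton c)) = decide (c ∈ ['.', '?', '!']) := by
  have h1 : (String.singleton c == ".") = (c == '.') := by simp [String.singleton, String.ext_iff]
  have h2 : (String.singleton c == "?") = (c == '?') := by simp [String.singleton, String.ext_iff]
  have h3 : (String.singleton c == "!") = (c == '!') := by simp [String.singleton, String.ext_iff]
  have h4 : (String.singleton c == ":)") = false := by simp [String.singleton, String.ext_iff]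
  simp only [List.contains_cons, List.contains_nil, Bool.or_false, h1, h2, h3, h4]
  simp [beq_eq_decide]

theorem filterMap_if {α β : Type} (q : α → Bool) (g : α → β) (l : List α) :
    l.filterMap (fun x => if q x then some (g x) else none) = (l.filter q).map g := by
  induction l with
  | nil => simp
  | cons a l ih => by_cases h : q a <;> simp [h, ih]

-- A's slicing fold produces one line per mark.
theorem fold_len (cs : List Char) (ms : List (Int × Char)) : ∀ (s : Int) (acc : List (List Char)),
    ((ms.foldl (fun (st : Int × List (List Char)) pc =>
        (pc.1 + 1, st.2 ++ [PySem.Chars.strip (PySem.Chars.slice cs (some st.1) (some (pc.1 + 1)))])) (s, acc)).2).length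
    = acc.length + ms.length := by
  induction ms with
  | nil => intro s acc; simp
  | cons m ms ih =>
    intro s acc
    have := ih (m.1 + 1) (acc ++ [PySem.Chars.strip (PySem.Chars.slice cs (some s) (some (m.1 + 1)))])
    simp only [List.foldl_cons] at this ⊢
    rw [this]; simp; omega

-- A's range(num_sentences) loop (whose prev_sentence stays "") concatenates the nonempty
-- lines among the first k, each followed by a space.
theorem tailA (L : List (List Char)) (k : Nat) (hk : k ≤ L.length) : ∀ (acc : List Char),
    ((List.range k).foldl
      (fun (st : List Char × List Char) (j : Nat) =>
        if st.1 ≠ (PySem.List.pyGet? L (0 + (j : Int))).getD []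
        then (st.1, st.2 ++ ((PySem.List.pyGet? L (0 + (j : Int))).getD [] ++ [' '])) else st) ([], acc))
    = ([], acc ++ ((((L.take k).filter (fun l => l ≠ [])).map (fun l => l ++ [' '])).flatten)) := by
  induction k with
  | zero => intro acc; simp
  | succ k ih =>
    intro acc
    have hk' : k ≤ L.length := by omega
    have hkl : k < L.length := by omega
    rw [List.range_succ, List.foldl_append, ih hk' acc]
    have htake : L.take (k+1) = L.take k ++ [L[k]] := by
      rw [List.take_add_one]; simp [List.getElem?_eq_getElem hkl]
    by_cases h : L[k] = []
    · simp [List.foldl_cons, htake, List.getElem?_eq_getElem hkl, h]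
    · simp only [List.foldl_cons, List.foldl_nil, zero_add, PySem.List.pyGet?_natCast,
        List.getElem?_eq_getElem hkl, Option.getD_some, htake, List.filter_append,
        List.map_append, List.flatten_append]
      rw [if_pos (fun e => h e.symm)]
      simp [h]

-- The sentence decomposition both programs compute: split after each mark, in order.
def sentR (cs : List Char) : List (List Char) :=
  match h : cs.findIdx? (fun c => decide (c ∈ (['.', '?', '!'] : List Char))) with
  | none => []
  | some j => PySem.Chars.strip (cs.take (j + 1)) :: sentR (cs.drop (j + 1))
termination_by cs.length
decreasing_by
  have hj := (List.findIdx?_eq_some_iff_findIdx_eq.mp h).1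
  simp; omega

theorem sentR_none {cs : List Char}
    (h : cs.findIdx? (fun c => decide (c ∈ (['.', '?', '!'] : List Char))) = none) :
    sentR cs = [] := by
  conv_lhs => rw [sentR.eq_def]
  rw [h]

theorem sentR_some {cs : List Char} {j : Nat}
    (h : cs.findIdx? (fun c => decide (c ∈ (['.', '?', '!'] : List Char))) = some j) :
    sentR cs = PySem.Chars.strip (cs.take (j + 1)) :: sentR (cs.drop (j + 1)) := by
  conv_lhs => rw [sentR.eq_def]
  rw [h]

-- _next_mark's scan returns the first mark index at or after s, or -1.
theorem nextMark_spec (cs : List Char) : ∀ (fuel s : Nat), cs.length - s ≤ fuel →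
    nextMark cs (s : Int) =
      (match (cs.drop s).findIdx? (fun c => decide (c ∈ (['.', '?', '!'] : List Char))) with
       | none => -1
       | some j => ((s + j : Nat) : Int)) := by
  intro fuel
  induction fuel with
  | zero =>
    intro s hs
    have hle : cs.length ≤ s := by omega
    unfold nextMark
    rw [PySem.List.pyRange_one_eq_nil (by exact_mod_cast hle), List.drop_eq_nil_of_le hle]
    simp [nextMarkGo]
  | succ fuel ih =>
    intro s hs
    by_cases hlt : s < cs.length
    · unfold nextMark
      rw [PySem.List.pyRange_one_cons (by exact_mod_cast hlt)]
      have hdrop : cs.drop s = cs[s] :: cs.drop (s + 1) := (List.getElem_cons_drop hlt).symm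
      rw [hdrop, List.findIdx?_cons]
      simp only [nextMarkGo, PySem.List.pyGet?_natCast, List.getElem?_eq_getElem hlt,
        Option.getD_some]
      by_cases hm : cs[s] ∈ (['.', '?', '!'] : List Char)
      · simp [hm]
      · rw [if_neg hm]
        have hc : ((s : Int) + 1) = ((s + 1 : Nat) : Int) := by push_cast; ring
        rw [hc]
        have hrec := ih (s + 1) (by omega)
        unfold nextMark at hrec
        rw [hrec]
        simp only [hm, decide_false, Bool.false_eq_true, if_false]
        cases h' : (cs.drop (s + 1)).findIdx? (fun c => decide (c ∈ (['.', '?', '!'] : List Char))) with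
        | none => simp
        | some j => simp only [Option.map_some]; congr 1; omega
    · have hle : cs.length ≤ s := by omega
      unfold nextMark
      rw [PySem.List.pyRange_one_eq_nil (by exact_mod_cast hle), List.drop_eq_nil_of_le hle]
      simp [nextMarkGo]

-- sentences from a cursor: sentTake cs s0 d are the sentences of cs.drop s0 whose first
-- sentence starts at 0 but whose mark search starts at offset d
def sentTake (cs : List Char) (s0 d : Nat) : List (List Char) :=
  match (cs.drop (s0 + d)).findIdx? (fun c => decide (c ∈ (['.', '?', '!'] : List Char))) with
  | none => []
  | some j => PySem.Chars.strip ((cs.drop s0).take (d + j + 1)) :: sentR (cs.drop (s0 + d + j + 1))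

theorem sentTake_zero (cs : List Char) (s : Nat) : sentTake cs s 0 = sentR (cs.drop s) := by
  unfold sentTake
  simp only [Nat.add_zero]
  cases h : (cs.drop s).findIdx? (fun c => decide (c ∈ (['.', '?', '!'] : List Char))) with
  | none => rw [sentR_none h]
  | some j =>
    rw [sentR_some h]
    rw [List.drop_drop]
    show PySem.Chars.strip (List.take (0 + j + 1) (List.drop s cs)) :: sentR (List.drop (s + j + 1) cs) =
      PySem.Chars.strip (List.take (j + 1) (List.drop s cs)) :: sentR (List.drop (s + (j + 1)) cs)
    have e1 : (0 : Nat) + j + 1 = j + 1 := by omega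
    have e2 : s + j + 1 = s + (j + 1) := by omega
    rw [e1, e2]

-- A's fold over the filtered enumeration computes exactly the sentence decomposition.
theorem foldA_sentR (cs : List Char) : ∀ (u : List Char), ∀ (s0 d : Nat) (acc : List (List Char)),
    cs.drop (s0 + d) = u →
    (((PySem.List.enumerate u ((s0 + d : Nat) : Int)).filter
          (fun pc => decide (pc.2 ∈ (['.', '?', '!'] : List Char)))).foldl
        (fun (st : Int × List (List Char)) pc =>
          (pc.1 + 1, st.2 ++ [PySem.Chars.strip (PySem.Chars.slice cs (some st.1) (some (pc.1 + 1)))]))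
        (((s0 : Nat) : Int), acc)).2
      = acc ++ sentTake cs s0 d := by
  intro u
  induction u with
  | nil =>
    intro s0 d acc h
    unfold sentTake
    rw [h]
    simp only [PySem.List.enumerate_nil, List.filter_nil, List.foldl_nil, List.findIdx?_nil,
      List.append_nil]
  | cons c u ih =>
    intro s0 d acc h
    have htail : cs.drop (s0 + d + 1) = u := by
      rw [← List.tail_drop, h]
      rfl
    rw [PySem.List.enumerate_cons]
    have hc1 : ((s0 + d : Nat) : Int) + 1 = ((s0 + d + 1 : Nat) : Int) := by push_cast; ring
    by_cases hm : c ∈ (['.', '?', '!'] : List Char)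
    · simp only [List.filter_cons, hm, decide_true, if_true, List.foldl_cons]
      rw [hc1]
      have hslice : PySem.Chars.slice cs (some ((s0 : Nat) : Int)) (some ((s0 + d + 1 : Nat) : Int))
          = (cs.drop s0).take (d + 1) := by
        rw [PySem.Chars.slice_eq_listSlice, PySem.List.slice_natCast]
        congr 1; omega
      rw [hslice]
      have hrec := ih (s0 + d + 1) 0
        (acc ++ [PySem.Chars.strip (List.take (d + 1) (List.drop s0 cs))]) (by simpa using htail)
      simp only [Nat.add_zero] at hrec
      rw [sentTake_zero] at hrec
      rw [hrec]
      unfold sentTake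
      rw [h, List.findIdx?_cons]
      simp only [hm, decide_true, if_true]
      simp [List.append_assoc]
    · simp only [List.filter_cons, hm, decide_false, Bool.false_eq_true, if_false]
      rw [hc1]
      have hrw : ((s0 + d + 1 : Nat) : Int) = ((s0 + (d + 1) : Nat) : Int) := by push_cast; ring
      rw [hrw]
      have hrec := ih s0 (d + 1) acc (by simpa [← Nat.add_assoc] using htail)
      rw [hrec]
      congr 1
      -- sentTake cs s0 (d+1) = sentTake cs s0 d  when cs[s0+d] is not a mark
      unfold sentTake
      rw [h, List.findIdx?_cons]
      simp only [hm, decide_false, Bool.false_eq_true, if_false]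
      have h' : cs.drop (s0 + (d + 1)) = u := by simpa [← Nat.add_assoc] using htail
      rw [h']
      cases hf : u.findIdx? (fun c => decide (c ∈ (['.', '?', '!'] : List Char))) with
      | none => simp
      | some j =>
        simp only [Option.map_some]
        have e1 : d + 1 + j + 1 = d + (j + 1) + 1 := by omega
        have e2 : s0 + (d + 1) + j + 1 = s0 + d + (j + 1) + 1 := by omega
        rw [e1, e2]

-- B's while-loop takes the first k sentences, capitalizes, filters empties, appends spaces.
theorem goB_spec (cs : List Char) : ∀ (k : Nat) (s : Nat) (parts : List (List Char)),
    goB cs k (s : Int) parts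
      = parts ++ ((((sentR (cs.drop s)).map pyCapitalize).take k).filter
            (fun l => l ≠ [])).map (fun l => l ++ [' ']) := by
  intro k
  induction k with
  | zero => intro s parts; simp [goB]
  | succ k ih =>
    intro s parts
    simp only [goB]
    rw [nextMark_spec cs cs.length s (by omega)]
    cases h : (cs.drop s).findIdx? (fun c => decide (c ∈ (['.', '?', '!'] : List Char))) with
    | none =>
      rw [sentR_none h]
      simp
    | some j =>
      rw [sentR_some h]
      have hne : ¬(((s + j : Nat) : Int) = -1) := by omega
      rw [if_neg hne]
      have hc1 : ((s + j : Nat) : Int) + 1 = ((s + j + 1 : Nat) : Int) := by push_cast; ring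
      have hslice : PySem.Chars.slice cs (some ((s : Nat) : Int)) (some (((s + j : Nat) : Int) + 1))
          = (cs.drop s).take (j + 1) := by
        rw [hc1, PySem.Chars.slice_eq_listSlice, PySem.List.slice_natCast]
        congr 1; omega
      rw [hslice, hc1, ih (s + j + 1)]
      have hdd : List.drop (j + 1) (List.drop s cs) = List.drop (s + j + 1) cs := by
        rw [List.drop_drop, ← Nat.add_assoc]
      rw [hdd]
      simp only [List.map_cons, List.take_succ_cons, List.filter_cons]
      by_cases hhd0 : pyCapitalize (PySem.Chars.strip (List.take (j + 1) (List.drop s cs))) = []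
      · simp [hhd0]
      · simp [hhd0, List.append_assoc]

-- B's top-level test 'any mark occurs' is 'the mark count is positive'.
theorem anyMark_iff (cs : List Char) :
    ((['.', '?', '!'] : List Char).any (fun c => cs.contains c) = true) ↔
      0 < cs.countP (fun c => decide (c ∈ (['.', '?', '!'] : List Char))) := by
  rw [List.countP_pos_iff]
  simp only [List.any_eq_true]
  constructor
  · rintro ⟨c, h1, h2⟩; exact ⟨c, by simpa using h2, by simpa using h1⟩
  · rintro ⟨c, h1, h2⟩; exact ⟨c, by simpa using h2, by simpa using h1⟩

-- ===== VERDICT (by name: the statement is the Claim_ definition above) =====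
theorem get_sliced_output_spec : Claim_equal_get_sliced_output := by
  intro text n _ hpre
  unfold Pre_get_sliced_output at hpre
  unfold Spec_get_sliced_output get_sliced_output get_sliced_output_alt
  simp only [charTest_bridge, filterMap_if, List.foldl_map]
  have hAL := foldA_sentR text.toList text.toList 0 0 [] (by simp)
  simp only [Nat.add_zero, Nat.cast_zero, List.nil_append] at hAL
  rw [sentTake_zero] at hAL
  simp only [List.drop_zero] at hAL
  have hcnt : text.toList.countP (fun c => decide (c ∈ (['.', '?', '!'] : List Char)))
      = (List.filter (fun pc => decide (pc.2 ∈ (['.', '?', '!'] : List Char)))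
          (PySem.List.enumerate text.toList 0)).length := by
    rw [← List.countP_eq_length_filter]
    conv_lhs => rw [← PySem.List.map_snd_enumerate text.toList (0 : Int)]
    rw [List.countP_map]
    rfl
  by_cases hM : (List.filter (fun pc => decide (pc.2 ∈ (['.', '?', '!'] : List Char)))
      (PySem.List.enumerate text.toList 0)) = []
  · have hA : ¬(List.map (fun pc : Int × Char => pc.1 + 1)
        (List.filter (fun pc => decide (pc.2 ∈ (['.', '?', '!'] : List Char)))
          (PySem.List.enumerate text.toList 0)) ≠ []) := by rw [hM]; simp
    rw [if_neg hA]
    have hc0 : text.toList.countP (fun c => decide (c ∈ (['.', '?', '!'] : List Char))) = 0 := by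
      rw [hcnt, hM]; rfl
    have hB : ¬((['.', '?', '!'] : List Char).any (fun c => text.toList.contains c) = true) := by
      rw [anyMark_iff]; omega
    rw [if_neg hB]
  · have hA : List.map (fun pc : Int × Char => pc.1 + 1)
        (List.filter (fun pc => decide (pc.2 ∈ (['.', '?', '!'] : List Char)))
          (PySem.List.enumerate text.toList 0)) ≠ [] := by simpa using hM
    rw [if_pos hA]
    have hpos : 0 < text.toList.countP (fun c => decide (c ∈ (['.', '?', '!'] : List Char))) := by
      rw [hcnt]; exact List.length_pos_of_ne_nil hM
    rw [if_pos ((anyMark_iff text.toList).mpr hpos)]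
    rw [hAL]
    have hlen := fold_len text.toList
      (List.filter (fun pc => decide (pc.2 ∈ (['.', '?', '!'] : List Char)))
        (PySem.List.enumerate text.toList 0)) 0 []
    rw [hAL] at hlen
    simp only [List.length_nil, Nat.zero_add] at hlen
    have hk : n.toNat ≤ ((sentR text.toList).map pyCapitalize).length := by
      have hle : n ≤ (text.toList.countP (fun c => decide (c ∈ (['.', '?', '!'] : List Char))) : Int) := by
        rcases hpre with h | h
        · omega
        · exact h
      rw [List.length_map, hlen, ← hcnt]
      omega
    rw [PySem.List.pyRange_one, List.foldl_map]
    simp only [Int.sub_zero]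
    rw [tailA ((sentR text.toList).map pyCapitalize) n.toNat hk []]
    have hB := goB_spec text.toList n.toNat 0 []
    simp only [Nat.cast_zero, List.drop_zero, List.nil_append] at hB
    rw [hB]
    simp

theorem get_sliced_output_raises : Claim_raises_get_sliced_output := by
  unfold Claim_raises_get_sliced_output
  constructor
  · intro t n _ hr hp
    unfold Raises_get_sliced_output at hr
    unfold Pre_get_sliced_output at hp
    omega
  · refine ⟨by decide, by decide, by decide⟩

-- self-check: the raise witness indeed lies outside Pre_ (via the first half of the raises claim)
theorem pvRaiseWitness_outside_Pre_ok :
    ¬ Pre_get_sliced_output pvRaiseWitness_get_sliced_output.1 pvRaiseWitness_get_sliced_output.2 :=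
  get_sliced_output_raises.1 _ _ (by decide) (by decide)
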